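-- pv_equiv track=rewrite | github.com/burapol01/Bitkub_Bot | services/audit_service.py | _path_is_sensitive
-- ===== SOURCE A (Python) =====
-- SENSITIVE_KEY_PARTS = {
--     "secret",
--     "token",
--     "password",
--     "passwd",
--     "api_key",
--     "apikey",
--     "api_secret",
--     "private_key",
--     "client_secret",
--     "access_key",
--     "access_token",
--     "refresh_token",
-- }
--
-- def _path_is_sensitive(path: str) -> bool:
--     normalized = str(path or "").strip().lower().replace("-", "_")
--     if not normalized:
--         return False
--     parts = [part for part in normalized.split(".") if part]
--     return any(
--         any(sensitive_part in part for sensitive_part in SENSITIVE_KEY_PARTS)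
--         for part in parts
--     )
-- ===== SOURCE B (Python) =====
-- SENSITIVE_KEY_PARTS = {
--     "secret",
--     "token",
--     "password",
--     "passwd",
--     "api_key",
--     "apikey",
--     "api_secret",
--     "private_key",
--     "client_secret",
--     "access_key",
--     "access_token",
--     "refresh_token",
-- }
--
-- def _path_is_sensitive(path: str) -> bool:
--     # No sensitive keyword contains a '.', so a keyword occurs in some
--     # dot-separated part iff it occurs in the whole normalized string:
--     # scan the whole string once, no split.
--     normalized = str(path or "").strip().lower().replace("-", "_")
--     return any(sk in normalized for sk in SENSITIVE_KEY_PARTS)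
-- ===== Notes on version B (the rewrite author's own statement) =====
-- stated objective: simpler
-- what changed: B drops the split-on-dot and the nested per-part scan entirely: since no sensitive keyword contains a dot, one flat substring scan over the whole normalized string (including the empty-string case, which falls out for free) gives the same answer.
import Mathlib
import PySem

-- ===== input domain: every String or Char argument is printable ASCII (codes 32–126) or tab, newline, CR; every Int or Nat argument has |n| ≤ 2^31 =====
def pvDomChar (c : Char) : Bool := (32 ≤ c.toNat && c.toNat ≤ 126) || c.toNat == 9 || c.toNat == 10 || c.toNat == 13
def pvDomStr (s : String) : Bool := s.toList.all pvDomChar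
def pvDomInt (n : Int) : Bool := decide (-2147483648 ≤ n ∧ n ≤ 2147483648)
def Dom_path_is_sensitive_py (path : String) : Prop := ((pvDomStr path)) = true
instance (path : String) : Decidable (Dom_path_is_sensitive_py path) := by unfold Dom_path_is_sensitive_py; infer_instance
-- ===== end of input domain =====

-- B drops A's split-on-dot and nested per-part scan: since no sensitive keyword
-- contains a dot, one flat substring scan over the whole normalized string is
-- equivalent (objective: simpler).

-- ===== PORT A =====
def SENSITIVE_KEY_PARTS : PySem.Set String := PySem.Set.ofList
  ["secret", "token", "password", "passwd", "api_key", "apikey", "api_secret",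
   "private_key", "client_secret", "access_key", "access_token", "refresh_token"]

def path_is_sensitive_py (path : String) : Bool :=
  -- `str(path or "")` is the identity on a str argument
  let normalized := PySem.Str.replace (PySem.Str.lower (PySem.Str.strip path)) "-" "_"
  if PySem.Str.len normalized == 0 then false
  else
    -- `.split(".")` with a non-empty literal separator never raises: getD is unreachable
    let parts := ((PySem.Str.split? normalized ".").getD []).filter
      (fun part => !(PySem.Str.len part == 0))
    parts.any (fun part => SENSITIVE_KEY_PARTS.any (fun sk => PySem.Str.isIn sk part))

-- ===== PORT B =====
def path_is_sensitive_py_alt (path : String) : Bool :=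
  let normalized := PySem.Str.replace (PySem.Str.lower (PySem.Str.strip path)) "-" "_"
  SENSITIVE_KEY_PARTS.any (fun sk => PySem.Str.isIn sk normalized)

-- ===== PRECONDITION & SPEC =====
def Spec_path_is_sensitive_py (path : String) (out : Bool) : Prop := out = path_is_sensitive_py_alt path
instance (path : String) (out : Bool) : Decidable (Spec_path_is_sensitive_py path out) := by unfold Spec_path_is_sensitive_py; infer_instance

-- ===== CLAIM (what is proved, stated in full; the proofs are below) =====
def Claim_equal_path_is_sensitive_py : Prop := ∀ (path : String), Dom_path_is_sensitive_py path → Spec_path_is_sensitive_py path (path_is_sensitive_py path)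

-- ===== LEMMAS AND PROOFS =====

-- go of PySem.Chars.splitOn with a single-char separator computes List.splitOn
theorem pv_splitOn_go_eq (c : Char) :
    ∀ (fuel : Nat) (l cur : List Char) (acc : List (List Char)), l.length < fuel →
      PySem.Chars.splitOn.go [c] fuel l cur acc
        = acc.reverse ++ List.modifyHead (cur.reverse ++ ·) (l.splitOn c) := by
  intro fuel
  induction fuel with
  | zero => intro l cur acc h; omega
  | succ n ih =>
    intro l cur acc h
    match l with
    | [] =>
      rw [PySem.Chars.splitOn.go]
      simp [List.splitOn_nil]
      omega
    | a :: rest =>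
      by_cases hac : a = c
      · subst hac
        have hp : List.isPrefixOf [a] (a :: rest) = true := by
          simp [List.isPrefixOf]
        rw [PySem.Chars.splitOn.go]
        simp only [hp, if_true, List.length_singleton, List.drop_succ_cons, List.drop_zero]
        rw [ih rest [] (cur.reverse :: acc) (by simpa using Nat.lt_of_succ_lt_succ h)]
        simp only [List.splitOn, List.splitOnP_cons, beq_self_eq_true, if_true,
          List.modifyHead_cons, List.reverse_cons, List.append_assoc,
          List.singleton_append, List.append_nil]
        cases hrc : List.splitOnP (fun x => x == a) rest with
        | nil => rfl
        | cons x t => rfl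
      · have hp : List.isPrefixOf [c] (a :: rest) = false := by
          simp only [List.isPrefixOf, Bool.and_eq_false_iff]
          left
          simpa using fun hba => hac hba.symm
        rw [PySem.Chars.splitOn.go]
        simp only [hp]
        rw [ih rest (a :: cur) acc (by simpa using Nat.lt_of_succ_lt_succ h)]
        have h2 : (a :: rest).splitOn c = List.modifyHead (a :: ·) (rest.splitOn c) := by
          simp [List.splitOn, List.splitOnP_cons, hac]
        rw [h2, List.modifyHead_modifyHead]
        cases rest.splitOn c with
        | nil => rfl
        | cons x t => simp

theorem pv_splitOn_single (c : Char) (s : List Char) :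
    PySem.Chars.splitOn s [c] = s.splitOn c := by
  rw [PySem.Chars.splitOn, pv_splitOn_go_eq c (s.length + 1) s [] [] (by omega)]
  have h : List.modifyHead (([] : List Char).reverse ++ ·) (s.splitOn c) = s.splitOn c := by
    cases hs : s.splitOn c with
    | nil => rfl
    | cons a t => simp
  simpa using h

-- a word not containing c that is a prefix of l₁ ++ c :: l₂ is a prefix of l₁
theorem pv_prefix_helper {k t l₂ : List Char} {c : Char} (hc : c ∉ k) :
    ∀ l₁ : List Char, k ++ t = l₁ ++ c :: l₂ → k <+: l₁ := by
  induction k generalizing t with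
  | nil => intro l₁ _; exact List.nil_prefix
  | cons d k' ih =>
    intro l₁ h
    cases l₁ with
    | nil =>
      simp only [List.cons_append, List.nil_append, List.cons.injEq] at h
      exact absurd (h.1 ▸ List.mem_cons_self) hc
    | cons a l₁' =>
      simp only [List.cons_append, List.cons.injEq] at h
      have hk' : k' <+: l₁' :=
        ih (fun hm => hc (List.mem_cons_of_mem _ hm)) l₁' h.2
      exact h.1 ▸ List.cons_prefix_cons.mpr ⟨rfl, hk'⟩

-- a separator-free word is an infix of l₁ ++ c :: l₂ iff it is an infix of a side
theorem pv_infix_append_cons {k : List Char} {c : Char} (hc : c ∉ k) :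
    ∀ (l₁ l₂ : List Char), (k <:+: l₁ ++ c :: l₂ ↔ k <:+: l₁ ∨ k <:+: l₂) := by
  intro l₁
  induction l₁ with
  | nil =>
    intro l₂
    constructor
    · rintro ⟨s, t, hst⟩
      cases s with
      | nil =>
        cases k with
        | nil => exact Or.inl List.nil_infix
        | cons d k' =>
          simp only [List.nil_append, List.cons_append, List.cons.injEq] at hst
          exact absurd (hst.1 ▸ List.mem_cons_self) hc
      | cons a s' =>
        simp only [List.nil_append, List.cons_append, List.cons.injEq] at hst
        exact Or.inr ⟨s', t, hst.2⟩
    · rintro (h | h)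
      · rw [List.infix_nil] at h
        exact h ▸ List.nil_infix
      · obtain ⟨s, t, hst⟩ := h
        exact ⟨c :: s, t, by simp [hst]⟩
  | cons a l₁' ih =>
    intro l₂
    constructor
    · rintro ⟨s, t, hst⟩
      cases s with
      | nil =>
        cases k with
        | nil => exact Or.inl List.nil_infix
        | cons d k' =>
          simp only [List.nil_append, List.cons_append, List.cons.injEq] at hst
          have hk' : k' <+: l₁' :=
            pv_prefix_helper (fun hm => hc (List.mem_cons_of_mem _ hm)) l₁' hst.2
          exact Or.inl ((hst.1 ▸ List.cons_prefix_cons.mpr ⟨rfl, hk'⟩ :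
            (d :: k') <+: (a :: l₁')).isInfix)
      | cons a' s' =>
        simp only [List.cons_append, List.cons.injEq] at hst
        refine (ih l₂).mp ⟨s', t, hst.2⟩ |>.imp (fun h => ?_) id
        obtain ⟨u, v, huv⟩ := h
        exact ⟨a :: u, v, by simp [huv]⟩
    · rintro (h | h)
      · obtain ⟨u, v, huv⟩ := h
        exact ⟨u, v ++ c :: l₂, by rw [← huv]; simp⟩
      · obtain ⟨u, v, huv⟩ := h
        exact ⟨(a :: l₁' ++ [c]) ++ u, v, by rw [← huv]; simp⟩

-- a c-free keyword is in [c].intercalate (p :: ps) iff it is in one of the pieces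
theorem pv_isIn_intercalate {k : List Char} {c : Char} (hc : c ∉ k) :
    ∀ (ps : List (List Char)) (p : List Char),
      PySem.Chars.isIn k ([c].intercalate (p :: ps))
        = (p :: ps).any (fun q => PySem.Chars.isIn k q) := by
  intro ps
  induction ps with
  | nil => intro p; simp [List.intercalate]
  | cons q ps' ih =>
    intro p
    have hi : [c].intercalate (p :: q :: ps') = p ++ c :: [c].intercalate (q :: ps') := by
      simp [List.intercalate, List.intersperse]
    rw [hi, List.any_cons, ← ih q, Bool.eq_iff_iff]
    simp only [Bool.or_eq_true, PySem.Chars.isIn_iff_infix]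
    exact pv_infix_append_cons hc p _

-- isIn over the dot-split: a dot-free keyword is in the whole string iff in some part
theorem pv_isIn_splitOn {k : List Char} {c : Char} (hc : c ∉ k) (s : List Char) :
    (s.splitOn c).any (fun p => PySem.Chars.isIn k p) = PySem.Chars.isIn k s := by
  cases hsp : s.splitOn c with
  | nil => exact absurd hsp (List.splitOnP_ne_nil _ s)
  | cons p ps =>
    have h2 := pv_isIn_intercalate hc ps p
    rw [← hsp, List.intercalate_splitOn s c] at h2
    rw [← hsp]
    exact h2.symm

-- the two bodies agree for any keyword list of non-empty, dot-free keywords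
theorem pv_core (kws : List String) (hk : ∀ k ∈ kws, k.toList ≠ [] ∧ '.' ∉ k.toList)
    (nrm : String) :
    (if PySem.Str.len nrm == 0 then false
     else
       (((PySem.Str.split? nrm ".").getD []).filter
           (fun part => !(PySem.Str.len part == 0))).any
         (fun part => kws.any (fun sk => PySem.Str.isIn sk part)))
      = kws.any (fun sk => PySem.Str.isIn sk nrm) := by
  have hB : ∀ m : List Char,
      kws.any (fun sk => PySem.Chars.isIn sk.toList m)
        = (m.splitOn '.').any
            (fun x => kws.any (fun sk => PySem.Chars.isIn sk.toList x)) := by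
    intro m
    rw [PySem.List.any_congr_mem
          (g := fun sk => (m.splitOn '.').any (fun x => PySem.Chars.isIn sk.toList x))
          (fun sk hsk => (pv_isIn_splitOn (hk sk hsk).2 m).symm)]
    rw [Bool.eq_iff_iff]
    simp only [List.any_eq_true]
    constructor
    · rintro ⟨sk, hsk, x, hx, h⟩; exact ⟨x, hx, sk, hsk, h⟩
    · rintro ⟨x, hx, sk, hsk, h⟩; exact ⟨sk, hsk, x, hx, h⟩
  have hnil : kws.any (fun sk => PySem.Chars.isIn sk.toList []) = false := by
    simp only [List.any_eq_false]
    intro sk hsk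
    rw [Bool.not_eq_true, PySem.Chars.isIn_eq_false_iff, List.infix_nil]
    exact (hk sk hsk).1
  by_cases hn : nrm.toList = []
  · have hlen : (PySem.Str.len nrm == 0) = true := by
      simp [PySem.Str.len_eq, hn]
    rw [hlen]
    simp only [if_true]
    simp only [PySem.Str.isIn_eq]
    rw [PySem.List.any_congr_mem (g := fun sk => PySem.Chars.isIn sk.toList [])
          (fun sk _ => by rw [hn]), hnil]
  · have hlen : (PySem.Str.len nrm == 0) = false := by
      simp only [PySem.Str.len_eq, beq_eq_false_iff_ne, ne_eq, Int.natCast_eq_zero, List.length_eq_zero_iff]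
      exact hn
    rw [hlen]
    simp only [Bool.false_eq_true, if_false]
    simp only [PySem.Str.split?, PySem.Chars.split?]
    simp only [show (".".toList.isEmpty) = false from rfl, Bool.false_eq_true, if_false,
      Option.map_some, Option.getD_some]
    rw [show ".".toList = ['.'] from rfl, pv_splitOn_single '.' nrm.toList]
    simp only [List.filter_map, List.any_map, Function.comp_def, PySem.Str.len_eq,
      String.toList_ofList]
    simp only [PySem.Str.isIn_eq] at hB ⊢
    rw [hB nrm.toList, List.any_filter]
    apply PySem.List.any_congr_mem
    intro x _
    by_cases hx : x = []
    · subst hx; simp [hnil]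
    · have hx0 : (((x.length : Int)) == 0) = false := by
        simp [List.length_eq_zero_iff, hx]
      rw [hx0]
      simp

theorem pv_main (path : String) :
    path_is_sensitive_py path = path_is_sensitive_py_alt path := by
  simp only [path_is_sensitive_py, path_is_sensitive_py_alt]
  exact pv_core SENSITIVE_KEY_PARTS (by decide) _

-- ===== VERDICT (by name: the statement is the Claim_ definition above) =====
theorem path_is_sensitive_py_spec : Claim_equal_path_is_sensitive_py := by
  intro path _
  unfold Spec_path_is_sensitive_py
  exact pv_main path
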